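-- pv_equiv track=rewrite | github.com/pypi-data/pypi-mirror-402 | packages/elspais/elspais-0.11.2-py3-none-any.whl/elspais/trace_view/review/position.py | find_keyword_occurrence
-- ===== SOURCE A (Python) =====
-- from typing import Any, Dict, List, Optional, Tuple
--
-- def find_keyword_occurrence(text: str, keyword: str, occurrence: int) -> Optional[Tuple[int, int]]:
--     """
--     Find character range of the Nth occurrence of a keyword.
--
--     REQ-tv-d00012-G: For WORD positions, find the Nth occurrence based on keywordOccurrence.
--
--     Args:
--         text: The text to search in
--         keyword: The word/phrase to find
--         occurrence: 1-based occurrence index (1 = first, 2 = second, etc.)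
--
--     Returns:
--         Tuple of (start_offset, end_offset) for the Nth occurrence, or None if not found.
--     """
--     if not text or not keyword or occurrence < 1:
--         return None
--
--     current_occurrence = 0
--     start_index = 0
--
--     while start_index < len(text):
--         index = text.find(keyword, start_index)
--         if index == -1:
--             break
--
--         current_occurrence += 1
--         if current_occurrence == occurrence:
--             return (index, index + len(keyword))
--
--         # Move past this occurrence to find next
--         start_index = index + 1
--
--     return None
-- ===== SOURCE B (Python) =====
-- def find_keyword_occurrence(text, keyword, occurrence):
--     if not text or not keyword or occurrence < 1:
--         return None
--     m = len(keyword)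
--     # all (overlapping) match positions, collected up front
--     hits = [i for i in range(len(text)) if text[i:i + m] == keyword]
--     if occurrence > len(hits):
--         return None
--     start = hits[occurrence - 1]
--     return (start, start + m)
-- ===== Notes on version B (the rewrite author's own statement) =====
-- stated objective: alternative
-- what changed: Replaces the stateful while-loop (repeated str.find, occurrence counter, early return) with a staged computation: one comprehension collects every overlapping match position by slice comparison, then the result is a bounds-checked index into that list; trades str.find's fast library search for an explicit full scan.
import Mathlib
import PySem

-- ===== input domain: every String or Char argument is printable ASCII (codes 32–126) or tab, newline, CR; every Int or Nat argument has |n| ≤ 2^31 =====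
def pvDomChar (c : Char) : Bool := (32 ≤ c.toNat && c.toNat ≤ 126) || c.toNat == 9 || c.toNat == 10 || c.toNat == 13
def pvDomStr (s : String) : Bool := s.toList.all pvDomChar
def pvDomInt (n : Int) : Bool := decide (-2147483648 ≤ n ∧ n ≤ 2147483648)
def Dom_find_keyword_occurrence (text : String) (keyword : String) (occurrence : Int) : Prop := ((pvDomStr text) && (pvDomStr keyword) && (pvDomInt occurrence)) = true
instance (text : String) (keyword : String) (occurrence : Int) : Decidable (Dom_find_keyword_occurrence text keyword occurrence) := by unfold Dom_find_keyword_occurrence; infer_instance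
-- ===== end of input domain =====

-- B replaces A's stateful find-and-advance while-loop by a staged computation:
-- collect all overlapping match positions first, then index the (occurrence-1)-th; same values.

-- ===== PORT A =====

-- text.find(keyword, s) for a nonempty keyword and 0 ≤ s: the least index i ≥ s
-- where the keyword matches (exact: a nonempty keyword can only match at i < len(text)).
def pvFindFromA (cs ks : List Char) (s : Nat) : Option Nat :=
  List.find? (fun i => List.take ks.length (List.drop i cs) == ks) (List.range' s (cs.length - s))

-- A's while-loop; fuel = len(text) - start_index makes the recursion structural
-- (fuel 0 coincides with the loop guard start_index < len(text) being false).
def pvLoopA (cs ks : List Char) (occurrence : Int) : Nat → Nat → Int → Option (Int × Int)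
  | 0, _, _ => none
  | fuel + 1, s, cur =>
    if s < cs.length then
      match pvFindFromA cs ks s with
      | none => none
      | some i =>
        let cur' := cur + 1
        if cur' = occurrence then some ((i : Int), (i : Int) + (ks.length : Int))
        else pvLoopA cs ks occurrence fuel (i + 1) cur'
    else none

def find_keyword_occurrence (text : String) (keyword : String) (occurrence : Int) : Option (Int × Int) :=
  if text.toList = [] ∨ keyword.toList = [] ∨ occurrence < 1 then none
  else pvLoopA text.toList keyword.toList occurrence text.toList.length 0 0

-- ===== PORT B =====

-- B: the comprehension [i for i in range(len(text)) if text[i:i+m] == keyword]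
-- (slice comparison = take m ∘ drop i, exact for 0 ≤ i), then bounds check and index.
def find_keyword_occurrence_alt (text : String) (keyword : String) (occurrence : Int) : Option (Int × Int) :=
  if text.toList = [] ∨ keyword.toList = [] ∨ occurrence < 1 then none
  else
    let cs := text.toList
    let ks := keyword.toList
    let hits := (List.range cs.length).filter
      (fun i => List.take ks.length (List.drop i cs) == ks)
    if (hits.length : Int) < occurrence then none
    else
      match hits[(occurrence - 1).toNat]? with
      | some start => some ((start : Int), (start : Int) + (ks.length : Int))
      | none => none   -- unreachable under the bounds check, as in the Python

-- ===== PRECONDITION & SPEC =====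
def Spec_find_keyword_occurrence (text : String) (keyword : String) (occurrence : Int) (out : Option (Int × Int)) : Prop := out = find_keyword_occurrence_alt text keyword occurrence
instance (text : String) (keyword : String) (occurrence : Int) (out : Option (Int × Int)) : Decidable (Spec_find_keyword_occurrence text keyword occurrence out) := by unfold Spec_find_keyword_occurrence; infer_instance

-- ===== CLAIM (what is proved, stated in full; the proofs are below) =====
def Claim_equal_find_keyword_occurrence : Prop := ∀ (text : String) (keyword : String) (occurrence : Int), Dom_find_keyword_occurrence text keyword occurrence → Spec_find_keyword_occurrence text keyword occurrence (find_keyword_occurrence text keyword occurrence)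

-- ===== LEMMAS AND PROOFS =====

-- common reference: pick the k-th (1-based) element of the list of match positions
def pvPick (k : Int) : List Nat → Option Nat
  | [] => none
  | i :: rest => if k = 1 then some i else pvPick (k - 1) rest

-- find? on a range of consecutive indices splits the filtered list at the first hit
theorem pvFind_range'_split (p : Nat → Bool) :
    ∀ (m s i : Nat), List.find? p (List.range' s m) = some i →
      s ≤ i ∧ i < s + m ∧
        (List.range' s m).filter p = i :: (List.range' (i + 1) (s + m - 1 - i)).filter p := by
  intro m
  induction m with
  | zero => intro s i h; simp [List.range'] at h
  | succ m ih =>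
    intro s i h
    rw [List.range'_succ] at h ⊢
    by_cases hp : p s = true
    · rw [List.find?_cons_of_pos hp] at h
      obtain rfl : s = i := by injection h
      refine ⟨Nat.le_refl _, by omega, ?_⟩
      have e : s + (m + 1) - 1 - s = m := by omega
      rw [e, List.filter_cons, if_pos hp]
    · rw [List.find?_cons_of_neg hp] at h
      obtain ⟨h1, h2, h3⟩ := ih (s + 1) i h
      refine ⟨by omega, by omega, ?_⟩
      have e : s + 1 + m - 1 - i = s + (m + 1) - 1 - i := by omega
      rw [e] at h3
      rw [List.filter_cons, if_neg hp, h3]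

-- A's loop selects the (occurrence - cur)-th match among indices ≥ s, given enough fuel
theorem pvLoopA_eq_pick (cs ks : List Char) (occurrence : Int) :
    ∀ (fuel s : Nat) (cur : Int), cs.length ≤ s + fuel →
      pvLoopA cs ks occurrence fuel s cur =
        (pvPick (occurrence - cur)
          ((List.range' s (cs.length - s)).filter
            (fun i => List.take ks.length (List.drop i cs) == ks))).map
          (fun i => ((i : Int), (i : Int) + (ks.length : Int))) := by
  intro fuel
  induction fuel with
  | zero =>
    intro s cur hf
    have : cs.length - s = 0 := by omega
    simp [pvLoopA, this, pvPick]
  | succ fuel ih =>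
    intro s cur hf
    by_cases hs : s < cs.length
    · simp only [pvLoopA, if_pos hs]
      cases hfind : pvFindFromA cs ks s with
      | none =>
        have : (List.range' s (cs.length - s)).filter
            (fun i => List.take ks.length (List.drop i cs) == ks) = [] := by
          rw [List.filter_eq_nil_iff]
          intro x hx
          have := List.find?_eq_none.mp hfind x hx
          simpa using this
        simp [this, pvPick]
      | some i =>
        obtain ⟨h1, h2, h3⟩ := pvFind_range'_split _ _ _ _ hfind
        rw [h3]
        have harith : s + (cs.length - s) - 1 - i = cs.length - (i + 1) := by omega
        rw [harith]
        simp only [pvPick]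
        by_cases hc : cur + 1 = occurrence
        · have : occurrence - cur = 1 := by omega
          simp [hc, this]
        · have hne : ¬ occurrence - cur = 1 := by omega
          have h2' : occurrence - cur - 1 = occurrence - (cur + 1) := by ring
          simp only [hc, hne, h2']
          exact ih (i + 1) (cur + 1) (by omega)
    · have h0 : cs.length - s = 0 := by omega
      simp [pvLoopA, hs, h0, pvPick]

-- 1-based pick coincides with 0-based list indexing
theorem pvPick_eq_getElem? : ∀ (l : List Nat) (k : Int), 1 ≤ k →
    pvPick k l = l[(k - 1).toNat]? := by
  intro l
  induction l with
  | nil => intro k _; simp [pvPick]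
  | cons i rest ih =>
    intro k hk
    by_cases h1 : k = 1
    · simp [pvPick, h1]
    · have e : (k - 1).toNat = (k - 1 - 1).toNat + 1 := by omega
      rw [pvPick, if_neg h1, ih (k - 1) (by omega), e]
      simp

-- ===== VERDICT (by name: the statement is the Claim_ definition above) =====
theorem find_keyword_occurrence_spec : Claim_equal_find_keyword_occurrence := by
  intro text keyword occurrence _
  unfold Spec_find_keyword_occurrence find_keyword_occurrence find_keyword_occurrence_alt
  split
  · rfl
  · rename_i hguard
    push_neg at hguard
    have hocc : 1 ≤ occurrence := by omega
    rw [pvLoopA_eq_pick _ _ _ _ _ _ (by omega)]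
    simp only [Nat.sub_zero, sub_zero, ← List.range_eq_range',
      pvPick_eq_getElem? _ _ hocc]
    set hits := (List.range text.toList.length).filter
      (fun i => List.take keyword.toList.length (List.drop i text.toList) == keyword.toList)
    have e : (occurrence - 1).toNat = occurrence.toNat - 1 := by omega
    rw [e]
    split
    · rename_i hlt
      have hnone : hits[occurrence.toNat - 1]? = none := by
        apply List.getElem?_eq_none
        omega
      simp [hnone]
    · cases hget : hits[occurrence.toNat - 1]? <;> simp
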